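-- pv_equiv track=rewrite | github.com/hyeseong-dev/programmers | lv0/taller/taller.py | solution
-- ===== SOURCE A (Python) =====
-- def solution(array, height):
--     answer = 0
--     array.sort()
--     for friend_height in array:
--         if friend_height > height:
--             answer += 1
--         elif friend_height == height:
--             break
--     return answer
-- ===== SOURCE B (Python) =====
-- def solution(array, height):
--     array.sort()  # keep A's in-place mutation of the argument
--     if height in array:
--         return 0
--     return sum(1 for x in array if x > height)
-- ===== Notes on version B (the rewrite author's own statement) =====
-- stated objective: simpler
-- what changed: Replaces the sorted scan-with-break by a direct membership test (height present -> 0) plus a count of elements strictly above height, which does not depend on the sort order at all; the sort is kept only for the argument mutation.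
import Mathlib
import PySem

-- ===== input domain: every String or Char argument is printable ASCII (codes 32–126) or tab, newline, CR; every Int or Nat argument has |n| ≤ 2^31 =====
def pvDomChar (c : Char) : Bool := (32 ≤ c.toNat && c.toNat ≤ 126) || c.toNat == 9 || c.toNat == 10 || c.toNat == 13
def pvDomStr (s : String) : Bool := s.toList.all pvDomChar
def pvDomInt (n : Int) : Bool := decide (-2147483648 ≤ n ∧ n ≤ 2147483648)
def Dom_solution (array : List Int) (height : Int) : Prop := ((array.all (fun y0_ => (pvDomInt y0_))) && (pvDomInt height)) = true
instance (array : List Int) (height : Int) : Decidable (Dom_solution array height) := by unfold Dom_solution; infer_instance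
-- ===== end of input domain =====

-- B replaces A's sorted scan-with-break by a membership test plus a count of elements above height
-- (simpler, order-independent); both programs sort the argument in place — equivalence is about the return value.


-- ===== PORT A =====
-- the for-loop with its break, over the sorted list, carrying 'answer'
def solLoopA (height : Int) : List Int → Int → Int
  | [], answer => answer
  | x :: xs, answer =>
    if x > height then solLoopA height xs (answer + 1)
    else if x == height then answer
    else solLoopA height xs answer

def solution (array : List Int) (height : Int) : Int :=
  solLoopA height (PySem.List.sorted array (fun x => x) false) 0

-- ===== PORT B =====
def solution_alt (array : List Int) (height : Int) : Int :=
  let s := PySem.List.sorted array (fun x => x) false  -- array.sort()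
  if s.contains height then 0
  else (s.countP (fun x => decide (x > height)) : Int)

-- ===== PRECONDITION & SPEC =====
def Spec_solution (array : List Int) (height : Int) (out : Int) : Prop := out = solution_alt array height
instance (array : List Int) (height : Int) (out : Int) : Decidable (Spec_solution array height out) := by unfold Spec_solution; infer_instance

-- ===== CLAIM (what is proved, stated in full; the proofs are below) =====
def Claim_equal_solution : Prop := ∀ (array : List Int) (height : Int), Dom_solution array height → Spec_solution array height (solution array height)

-- ===== LEMMAS AND PROOFS =====
-- On a ≤-sorted list, the scan-with-break returns acc if height is present, else acc + #{x > height}.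
theorem solLoopA_sorted (height : Int) (s : List Int) (hs : s.Pairwise (· ≤ ·)) :
    ∀ acc : Int, solLoopA height s acc =
      acc + (if height ∈ s then 0 else (s.countP (fun x => decide (x > height)) : Int)) := by
  induction s with
  | nil => intro acc; simp [solLoopA]
  | cons x xs ih =>
    intro acc
    rcases List.pairwise_cons.mp hs with ⟨hx, hxs⟩
    by_cases hgt : x > height
    · have hnm : height ∉ x :: xs := by
        intro hm
        rcases List.mem_cons.mp hm with rfl | hm
        · exact lt_irrefl _ hgt
        · exact absurd (lt_of_lt_of_le hgt (hx _ hm)) (lt_irrefl _)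
      rw [solLoopA, if_pos hgt, ih hxs (acc + 1)]
      have hnx : height ∉ xs := fun hm => hnm (List.mem_cons_of_mem _ hm)
      simp [hnm, hnx, hgt]
      ring
    · by_cases heq : x = height
      · subst heq
        rw [solLoopA, if_neg hgt, if_pos (by simp)]
        simp
      · have hlt : x < height := lt_of_le_of_ne (not_lt.mp hgt) heq
        rw [solLoopA, if_neg hgt, if_neg (by simpa using heq), ih hxs acc]
        have hmem : (height ∈ x :: xs) ↔ (height ∈ xs) := by
          simp [List.mem_cons, (Ne.symm heq)]
        simp [hmem, hgt]

-- ===== VERDICT (by name: the statement is the Claim_ definition above) =====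
theorem solution_spec : Claim_equal_solution := by
  intro array height _
  unfold Spec_solution solution solution_alt
  have hp := PySem.List.sorted_pairwise (xs := array) (key := fun x => x)
  rw [solLoopA_sorted height _ hp 0]
  by_cases hm : height ∈ PySem.List.sorted array (fun x => x) false
  · simp [hm]
  · simp [hm]
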